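-- pv_equiv track=rewrite | github.com/dariavasile/DataInTheWildProject | Data Processing/size_converter_hm.py | extract_min_max_sizes
-- ===== SOURCE A (Python) =====
-- def extract_min_max_sizes(sizes):
--     size_list = sizes.split('/')
--     size_list = [s.strip() for s in size_list]
--     sizes_order = ['XXS','XS', 'S', 'M', 'L', 'XL', 'XXL','2XL','3XL','4XL','5XL']
--     min_size = max_size = None
--
--     for size in size_list:
--         if size in sizes_order:
--             if min_size is None or sizes_order.index(size) < sizes_order.index(min_size):
--                 min_size = size
--             if max_size is None or sizes_order.index(size) > sizes_order.index(max_size):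
--                 max_size = size
--
--     return min_size, max_size
-- ===== SOURCE B (Python) =====
-- def extract_min_max_sizes(sizes):
--     sizes_order = ['XXS','XS', 'S', 'M', 'L', 'XL', 'XXL','2XL','3XL','4XL','5XL']
--     tokens = {s.strip() for s in sizes.split('/')}
--     present = [sz for sz in sizes_order if sz in tokens]
--     if not present:
--         return None, None
--     return present[0], present[-1]
-- ===== Notes on version B (the rewrite author's own statement) =====
-- stated objective: alternative
-- what changed: Reverses the traversal direction: instead of looping over the input tokens and threading running min/max via repeated sizes_order.index calls, B builds a set of stripped tokens once and scans the fixed ordered size table against it, so min and max are simply the first and last table entries present and no index computation or per-token comparison is needed.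
import Mathlib
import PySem

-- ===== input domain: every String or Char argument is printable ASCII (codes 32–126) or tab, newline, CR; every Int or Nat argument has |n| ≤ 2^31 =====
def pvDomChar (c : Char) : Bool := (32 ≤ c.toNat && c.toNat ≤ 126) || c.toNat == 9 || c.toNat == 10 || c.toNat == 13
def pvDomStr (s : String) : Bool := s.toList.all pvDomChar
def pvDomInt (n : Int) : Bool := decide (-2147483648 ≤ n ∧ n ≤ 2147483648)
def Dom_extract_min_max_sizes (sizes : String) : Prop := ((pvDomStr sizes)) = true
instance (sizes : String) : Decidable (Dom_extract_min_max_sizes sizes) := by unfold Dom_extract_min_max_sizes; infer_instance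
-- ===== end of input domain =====

-- B reverses the traversal: instead of threading running min/max through the token loop with
-- repeated sizes_order.index calls, it builds a set of stripped tokens once and scans the fixed
-- ordered size table against it, returning the first and last table entries present (objective: alternative).

-- ===== PORT A =====
def pvSizesOrder : List String := ["XXS","XS","S","M","L","XL","XXL","2XL","3XL","4XL","5XL"]

-- sizes_order.index(s), only ever invoked on members (Python would raise otherwise)
def pvIdx (s : String) : Nat := (PySem.List.index? pvSizesOrder s).getD 0

def pvStep (st : Option String × Option String) (size : String) : Option String × Option String :=
  if pvSizesOrder.contains size then
    ((match st.1 with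
      | none => some size
      | some m => if pvIdx size < pvIdx m then some size else some m),
     (match st.2 with
      | none => some size
      | some m => if pvIdx size > pvIdx m then some size else some m))
  else st

def extract_min_max_sizes (sizes : String) : Option String × Option String :=
  let size_list := ((PySem.Str.split? sizes "/").getD []).map (fun s => PySem.Str.strip s)
  size_list.foldl pvStep (none, none)

-- ===== PORT B =====
def extract_min_max_sizes_alt (sizes : String) : Option String × Option String :=
  let tokens : PySem.Set String :=
    PySem.Set.ofList (((PySem.Str.split? sizes "/").getD []).map (fun s => PySem.Str.strip s))
  let present := pvSizesOrder.filter (fun sz => PySem.Set.contains tokens sz)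
  if present = [] then (none, none) else (present.head?, present.getLast?)

-- ===== PRECONDITION & SPEC =====
def Spec_extract_min_max_sizes (sizes : String) (out : Option String × Option String) : Prop := out = extract_min_max_sizes_alt sizes
instance (sizes : String) (out : Option String × Option String) : Decidable (Spec_extract_min_max_sizes sizes out) := by unfold Spec_extract_min_max_sizes; infer_instance

-- ===== CLAIM (what is proved, stated in full; the proofs are below) =====
def Claim_equal_extract_min_max_sizes : Prop := ∀ (sizes : String), Dom_extract_min_max_sizes sizes → Spec_extract_min_max_sizes sizes (extract_min_max_sizes sizes)

-- ===== LEMMAS AND PROOFS =====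

-- ranks of the tokens that lie in the size table (proof-only device linking the two ports)
def pvRanks (tokens : List String) : List Nat :=
  (tokens.filter (fun t => pvSizesOrder.contains t)).map pvIdx

theorem pvGet_pvIdx (a : String) (ha : pvSizesOrder.contains a = true) :
    pvSizesOrder[pvIdx a]? = some a := by
  simp only [pvSizesOrder, List.contains_eq_mem, decide_eq_true_eq, List.mem_cons,
    List.not_mem_nil, or_false] at ha
  rcases ha with rfl|rfl|rfl|rfl|rfl|rfl|rfl|rfl|rfl|rfl|rfl <;> decide

theorem pvIdx_getElem? : ∀ x < 11, pvIdx ((pvSizesOrder[x]?).getD "") = x := by decide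

theorem pvIdx_of_getElem? {x : Nat} {t : String} (h : pvSizesOrder[x]? = some t) :
    pvIdx t = x := by
  have hx : x < pvSizesOrder.length := by
    by_contra hge
    rw [List.getElem?_eq_none (by omega)] at h
    simp at h
  have := pvIdx_getElem? x (by simpa [pvSizesOrder] using hx)
  rwa [h] at this

theorem pvMem_ranks {ts : List String} {x : Nat} :
    x ∈ pvRanks ts ↔ ∃ t, t ∈ ts ∧ pvSizesOrder.contains t = true ∧ pvSizesOrder[x]? = some t := by
  constructor
  · intro hx
    simp only [pvRanks, List.mem_map, List.mem_filter] at hx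
    obtain ⟨t, ⟨hts, hord⟩, rfl⟩ := hx
    exact ⟨t, hts, hord, pvGet_pvIdx t hord⟩
  · rintro ⟨t, hts, hord, hget⟩
    have : pvIdx t = x := pvIdx_of_getElem? hget
    simp only [pvRanks, List.mem_map, List.mem_filter]
    exact ⟨t, ⟨hts, hord⟩, this⟩

-- foldl min/max facts
theorem pvFoldl_min_mem : ∀ (r : List Nat) (k : Nat), r.foldl min k ∈ k :: r := by
  intro r
  induction r with
  | nil => intro k; simp
  | cons x r ih =>
    intro k
    have h := ih (min k x)
    rcases min_choice k x with h1 | h1 <;>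
      · rw [List.foldl_cons]
        rcases (List.mem_cons).1 h with h2 | h2 <;> simp [h1] at h2 ⊢ <;> simp [h2]

theorem pvFoldl_min_le : ∀ (r : List Nat) (k : Nat), ∀ x ∈ k :: r, r.foldl min k ≤ x := by
  intro r
  induction r with
  | nil => intro k x hx; simp at hx; simp [hx]
  | cons y r ih =>
    intro k x hx
    rw [List.foldl_cons]
    rcases (List.mem_cons).1 hx with rfl | hx
    · exact le_trans (ih (min x y) (min x y) (by simp)) (by omega)
    · rcases (List.mem_cons).1 hx with rfl | hx
      · exact le_trans (ih (min k x) (min k x) (by simp)) (by omega)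
      · exact ih (min k y) x (by simp [hx])

theorem pvFoldl_max_mem : ∀ (r : List Nat) (k : Nat), r.foldl max k ∈ k :: r := by
  intro r
  induction r with
  | nil => intro k; simp
  | cons x r ih =>
    intro k
    have h := ih (max k x)
    rcases max_choice k x with h1 | h1 <;>
      · rw [List.foldl_cons]
        rcases (List.mem_cons).1 h with h2 | h2 <;> simp [h1] at h2 ⊢ <;> simp [h2]

theorem pvFoldl_max_ge : ∀ (r : List Nat) (k : Nat), ∀ x ∈ k :: r, x ≤ r.foldl max k := by
  intro r
  induction r with
  | nil => intro k x hx; simp at hx; simp [hx]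
  | cons y r ih =>
    intro k x hx
    rw [List.foldl_cons]
    rcases (List.mem_cons).1 hx with rfl | hx
    · exact le_trans (by omega) (ih (max x y) (max x y) (by simp))
    · rcases (List.mem_cons).1 hx with rfl | hx
      · exact le_trans (by omega) (ih (max k x) (max k x) (by simp))
      · exact ih (max k y) x (by simp [hx])

-- the head of a filtered list is its first match
theorem pvFilter_head (l : List String) (p : String → Bool) :
    ∀ (m : Nat) (a : String), l[m]? = some a → p a = true →
      (∀ j b, j < m → l[j]? = some b → p b = false) → (l.filter p).head? = some a := by
  induction l with
  | nil => intro m a h; simp at h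
  | cons x l ih =>
    intro m a hget hpa hmin
    cases m with
    | zero =>
      simp at hget; subst hget
      simp [hpa]
    | succ m =>
      have hx : p x = false := hmin 0 x (by omega) (by simp)
      rw [List.filter_cons_of_neg (by simp [hx])]
      exact ih m a (by simpa using hget) hpa
        (fun j b hj hb => hmin (j + 1) b (by omega) (by simpa using hb))

-- the last element of a filtered list is its last match
theorem pvFilter_last (l : List String) (p : String → Bool) :
    ∀ (m : Nat) (a : String), l[m]? = some a → p a = true →
      (∀ j b, m < j → l[j]? = some b → p b = false) → (l.filter p).getLast? = some a := by
  induction l with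
  | nil => intro m a h; simp at h
  | cons x l ih =>
    intro m a hget hpa hmax
    cases m with
    | zero =>
      simp at hget; subst hget
      have hnil : l.filter p = [] := by
        rw [List.filter_eq_nil_iff]
        intro b hb
        obtain ⟨j, hj, hjb⟩ := List.getElem_of_mem hb
        simp [hmax (j + 1) b (by omega) (by simp [List.getElem?_eq_getElem hj, hjb])]
      rw [List.filter_cons_of_pos (by simp [hpa]), hnil]
      rfl
    | succ m =>
      have htail : (l.filter p).getLast? = some a :=
        ih m a (by simpa using hget) hpa
          (fun j b hj hb => hmax (j + 1) b (by omega) (by simpa using hb))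
      have hne : l.filter p ≠ [] := by
        intro hnil; rw [hnil] at htail; simp at htail
      by_cases hx : p x = true
      · rw [List.filter_cons_of_pos (by simp [hx])]
        cases hlf : l.filter p with
        | nil => exact absurd hlf hne
        | cons y ys => rw [hlf] at htail; rw [List.getLast?_cons_cons]; exact htail
      · rw [List.filter_cons_of_neg (by simp [hx])]
        exact htail

-- A's fold in terms of the ranks (invariant for the seeded min/max state)
theorem pvFold_some (ts : List String) : ∀ (a b : String),
    pvSizesOrder.contains a = true → pvSizesOrder.contains b = true →
    ts.foldl pvStep (some a, some b) =
      (pvSizesOrder[(pvRanks ts).foldl min (pvIdx a)]?,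
       pvSizesOrder[(pvRanks ts).foldl max (pvIdx b)]?) := by
  induction ts with
  | nil =>
    intro a b ha hb
    simp [pvRanks, pvGet_pvIdx a ha, pvGet_pvIdx b hb]
  | cons t ts ih =>
    intro a b ha hb
    by_cases ht : pvSizesOrder.contains t = true
    · have htm : t ∈ pvSizesOrder := by simpa using ht
      have hstep : pvStep (some a, some b) t =
          (some (if pvIdx t < pvIdx a then t else a),
           some (if pvIdx t > pvIdx b then t else b)) := by
        by_cases h1 : pvIdx t < pvIdx a <;> by_cases h2 : pvIdx b < pvIdx t <;>
          simp [pvStep, htm, h1, h2]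
      have ha' : pvSizesOrder.contains (if pvIdx t < pvIdx a then t else a) = true := by
        split <;> assumption
      have hb' : pvSizesOrder.contains (if pvIdx t > pvIdx b then t else b) = true := by
        split <;> assumption
      have hranks : pvRanks (t :: ts) = pvIdx t :: pvRanks ts := by
        simp [pvRanks, htm]
      have hia : pvIdx (if pvIdx t < pvIdx a then t else a) = min (pvIdx a) (pvIdx t) := by
        split <;> omega
      have hib : pvIdx (if pvIdx t > pvIdx b then t else b) = max (pvIdx b) (pvIdx t) := by
        split <;> omega
      rw [List.foldl_cons, hstep, ih _ _ ha' hb', hranks, List.foldl_cons, List.foldl_cons,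
        hia, hib]
    · have htm : t ∉ pvSizesOrder := by simpa using ht
      have hstep : pvStep (some a, some b) t = (some a, some b) := by
        simp [pvStep, htm]
      have hranks : pvRanks (t :: ts) = pvRanks ts := by
        simp [pvRanks, htm]
      rw [List.foldl_cons, hstep, ih _ _ ha hb, hranks]

theorem pvFold_none (ts : List String) :
    ts.foldl pvStep (none, none) =
      match pvRanks ts with
      | [] => ((none : Option String), (none : Option String))
      | k :: r => (pvSizesOrder[r.foldl min k]?, pvSizesOrder[r.foldl max k]?) := by
  induction ts with
  | nil => simp [pvRanks]
  | cons t ts ih =>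
    by_cases ht : pvSizesOrder.contains t = true
    · have htm : t ∈ pvSizesOrder := by simpa using ht
      have hstep : pvStep (none, none) t = (some t, some t) := by
        simp [pvStep, htm]
      have hranks : pvRanks (t :: ts) = pvIdx t :: pvRanks ts := by
        simp [pvRanks, htm]
      rw [List.foldl_cons, hstep, pvFold_some ts t t ht ht, hranks]
    · have htm : t ∉ pvSizesOrder := by simpa using ht
      have hstep : pvStep (none, none) t = (none, none) := by
        simp [pvStep, htm]
      have hranks : pvRanks (t :: ts) = pvRanks ts := by
        simp [pvRanks, htm]
      rw [List.foldl_cons, hstep, ih, hranks]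

-- B's membership predicate, simplified to plain list membership of the token list
theorem pvContains_ofList (ts : List String) (sz : String) :
    PySem.Set.contains (PySem.Set.ofList ts) sz = ts.contains sz := by
  simp [PySem.Set.contains, PySem.Set.mem_ofList, List.contains_eq_mem]

-- ===== VERDICT (by name: the statement is the Claim_ definition above) =====
theorem extract_min_max_sizes_spec : Claim_equal_extract_min_max_sizes := by
  intro sizes _
  unfold Spec_extract_min_max_sizes extract_min_max_sizes extract_min_max_sizes_alt
  set ts := ((PySem.Str.split? sizes "/").getD []).map (fun s => PySem.Str.strip s) with hts
  rw [pvFold_none]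
  have hpred : (fun sz => PySem.Set.contains (PySem.Set.ofList ts) sz) = (fun sz => ts.contains sz) := by
    funext sz; exact pvContains_ofList ts sz
  simp only [hpred]
  cases hr : pvRanks ts with
  | nil =>
    have hpres : pvSizesOrder.filter (fun sz => ts.contains sz) = [] := by
      rw [List.filter_eq_nil_iff]
      intro sz hsz
      simp only [List.contains_eq_mem, decide_eq_true_eq]
      intro hmem
      have hrank : pvIdx sz ∈ pvRanks ts := by
        simp only [pvRanks, List.mem_map, List.mem_filter]
        exact ⟨sz, ⟨hmem, by simpa using hsz⟩, rfl⟩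
      rw [hr] at hrank; exact List.not_mem_nil hrank
    rw [hpres]
    rfl
  | cons k r =>
    have hkmem : k ∈ pvRanks ts := by rw [hr]; simp
    obtain ⟨t0, _, _, _⟩ := pvMem_ranks.1 hkmem
    -- min side
    have hmmem : r.foldl min k ∈ pvRanks ts := by rw [hr]; exact pvFoldl_min_mem r k
    obtain ⟨tm, htm_ts, htm_ord, htm_get⟩ := pvMem_ranks.1 hmmem
    have hhead : (pvSizesOrder.filter (fun sz => ts.contains sz)).head? = some tm := by
      apply pvFilter_head _ _ (r.foldl min k) tm htm_get
      · simp [List.contains_eq_mem, htm_ts]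
      · intro j b hj hb
        simp only [List.contains_eq_mem, decide_eq_false_iff_not]
        intro hbts
        have hbord : pvSizesOrder.contains b = true := by
          have : b ∈ pvSizesOrder := List.mem_of_getElem? hb
          simpa using this
        have : j ∈ pvRanks ts := pvMem_ranks.2 ⟨b, hbts, hbord, hb⟩
        rw [hr] at this
        exact absurd (pvFoldl_min_le r k j this) (by omega)
    -- max side
    have hMmem : r.foldl max k ∈ pvRanks ts := by rw [hr]; exact pvFoldl_max_mem r k
    obtain ⟨tM, htM_ts, htM_ord, htM_get⟩ := pvMem_ranks.1 hMmem
    have hlast : (pvSizesOrder.filter (fun sz => ts.contains sz)).getLast? = some tM := by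
      apply pvFilter_last _ _ (r.foldl max k) tM htM_get
      · simp [List.contains_eq_mem, htM_ts]
      · intro j b hj hb
        simp only [List.contains_eq_mem, decide_eq_false_iff_not]
        intro hbts
        have hbord : pvSizesOrder.contains b = true := by
          have : b ∈ pvSizesOrder := List.mem_of_getElem? hb
          simpa using this
        have : j ∈ pvRanks ts := pvMem_ranks.2 ⟨b, hbts, hbord, hb⟩
        rw [hr] at this
        exact absurd (pvFoldl_max_ge r k j this) (by omega)
    have hne : pvSizesOrder.filter (fun sz => ts.contains sz) ≠ [] := by
      intro hnil; rw [hnil] at hhead; simp at hhead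
    simp only [if_neg hne, hhead, hlast, htm_get, htM_get]
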